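-- pv_equiv track=rewrite | github.com/RandomSearch18/python | code-challenges/80-happy-hopper/main.py | is_happy_hopper
-- ===== SOURCE A (Python) =====
-- def is_happy_hopper(numbers: list[int]) -> bool:
--     if len(numbers) < 1:
--         raise ValueError("Happy hopper check is not valid for empty lists")
--
--     differences = []
--     for i in range(0, len(numbers) - 1):
--         pair = numbers[i], numbers[i + 1]
--         differences.append(abs(pair[0] - pair[1]))
--
--     for required_difference in range(1, len(numbers)):
--         if required_difference not in differences:
--             return False
--
--     return True
-- ===== SOURCE B (Python) =====
-- def is_happy_hopper(numbers: list[int]) -> bool: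
--     if len(numbers) < 1:
--         raise ValueError("Happy hopper check is not valid for empty lists")
--
--     diffs = sorted(abs(a - b) for a, b in zip(numbers, numbers[1:]))
--     return diffs == list(range(1, len(numbers)))
-- ===== Notes on version B (the rewrite author's own statement) =====
-- stated objective: alternative
-- what changed: Replaces the per-required-value `not in` membership scans over the difference list by sorting the consecutive absolute differences once and comparing the sorted list for equality with list(range(1, n)).
import Mathlib
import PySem

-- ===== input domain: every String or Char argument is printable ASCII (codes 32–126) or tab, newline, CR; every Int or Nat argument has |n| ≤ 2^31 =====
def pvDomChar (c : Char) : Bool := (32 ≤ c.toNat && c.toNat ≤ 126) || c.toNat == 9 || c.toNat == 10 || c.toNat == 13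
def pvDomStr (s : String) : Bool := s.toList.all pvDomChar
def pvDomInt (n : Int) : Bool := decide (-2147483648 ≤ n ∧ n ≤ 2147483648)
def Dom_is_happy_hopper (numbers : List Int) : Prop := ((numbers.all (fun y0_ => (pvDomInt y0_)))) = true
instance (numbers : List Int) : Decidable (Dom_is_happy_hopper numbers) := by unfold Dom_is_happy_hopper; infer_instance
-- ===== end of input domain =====

-- B sorts the consecutive absolute differences once and compares with range(1, n),
-- instead of A's per-required-value `not in` membership scans (alternative algorithm).

-- ===== PORT A =====
def is_happy_hopper (numbers : List Int) : Bool :=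
  -- differences = []; for i in range(0, len(numbers)-1): differences.append(abs(numbers[i]-numbers[i+1]))
  let differences : List Int :=
    (PySem.List.pyRange 0 ((numbers.length : Int) - 1) 1).foldl
      (fun acc i =>
        acc ++ [|PySem.List.pyGetD numbers i 0 - PySem.List.pyGetD numbers (i + 1) 0|]) []
  -- for required_difference in range(1, len(numbers)): if required_difference not in differences: return False
  (PySem.List.pyRange 1 (numbers.length : Int) 1).all (fun r => differences.contains r)

-- ===== PORT B =====
def is_happy_hopper_alt (numbers : List Int) : Bool :=
  let diffs : List Int :=
    PySem.List.sorted
      ((numbers.zip (PySem.List.slice numbers (some 1) none)).map (fun p => |p.1 - p.2|))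
      (fun x => x) false
  decide (diffs = PySem.List.pyRange 1 (numbers.length : Int) 1)

-- ===== PRECONDITION & SPEC =====
-- A raises ValueError on the empty list; Pre_ excludes exactly that input.
def Pre_is_happy_hopper (numbers : List Int) : Prop := numbers ≠ []
instance (numbers : List Int) : Decidable (Pre_is_happy_hopper numbers) := by
  unfold Pre_is_happy_hopper; infer_instance
def pvWitness_is_happy_hopper : List Int := [3, 1, 2]

def Spec_is_happy_hopper (numbers : List Int) (out : Bool) : Prop := out = is_happy_hopper_alt numbers
instance (numbers : List Int) (out : Bool) : Decidable (Spec_is_happy_hopper numbers out) := by unfold Spec_is_happy_hopper; infer_instance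

-- ===== CLAIM (what is proved, stated in full; the proofs are below) =====
def Claim_equal_is_happy_hopper : Prop := ∀ (numbers : List Int), Dom_is_happy_hopper numbers → Pre_is_happy_hopper numbers → Spec_is_happy_hopper numbers (is_happy_hopper numbers)

-- ===== LEMMAS AND PROOFS =====

-- A's differences list equals B's (unsorted) difference list.
theorem differences_eq (numbers : List Int) :
    (PySem.List.pyRange 0 ((numbers.length : Int) - 1) 1).foldl
      (fun acc i =>
        acc ++ [|PySem.List.pyGetD numbers i 0 - PySem.List.pyGetD numbers (i + 1) 0|]) []
    = (numbers.zip (PySem.List.slice numbers (some 1) none)).map (fun p => |p.1 - p.2|) := by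
  rw [PySem.List.foldl_append_singleton_eq_map, List.nil_append, PySem.List.slice_from_one]
  apply List.ext_getElem
  · simp [PySem.List.length_pyRange_one, List.length_zip]
  · intro k hk1 hk2
    have hk : k + 1 < numbers.length := by
      simp [PySem.List.length_pyRange_one] at hk1
      omega
    simp only [List.getElem_map, PySem.List.getElem_pyRange_one, List.getElem_zip]
    have e1 : (0 : Int) + (k : Int) = ((k : Nat) : Int) := by omega
    rw [e1]
    have e2 : ((k : Nat) : Int) + 1 = ((k + 1 : Nat) : Int) := by omega
    rw [e2, PySem.List.pyGetD_natCast, PySem.List.pyGetD_natCast,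
      List.getD_eq_getElem _ _ (by omega), List.getD_eq_getElem _ _ hk]
    simp [List.getElem_tail]

-- Core: for a list with exactly as many elements as range a b, containing every
-- value of range a b is the same as sorting to exactly range a b.
theorem all_contains_iff_sorted_eq (l : List Int) (a b : Int)
    (hlen : l.length = (PySem.List.pyRange a b 1).length) :
    ((PySem.List.pyRange a b 1).all (fun r => l.contains r))
    = decide (PySem.List.sorted l (fun x => x) false = PySem.List.pyRange a b 1) := by
  set R := PySem.List.pyRange a b 1 with hR
  by_cases h : ∀ r ∈ R, r ∈ l
  · have hsp : List.Subperm R l :=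
      List.subperm_of_subset (PySem.List.nodup_pyRange_one a b) (fun x hx => h x hx)
    have hperm : R.Perm l := hsp.perm_of_length_le (le_of_eq hlen)
    have hsorted : PySem.List.sorted l (fun x => x) false = R :=
      PySem.List.sorted_eq_of_perm_of_pairwise_lt l R _ hperm
        (PySem.List.pairwise_lt_pyRange_one a b)
    simp only [hsorted, decide_true, List.all_eq_true, List.contains_iff_mem]
    exact h
  · have hne : ¬ PySem.List.sorted l (fun x => x) false = R := by
      intro heq
      apply h
      intro r hr
      have hperm : (PySem.List.sorted l (fun x => x) false).Perm l :=
        PySem.List.sorted_perm l _ _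
      exact hperm.mem_iff.mp (heq ▸ hr)
    rw [not_forall] at h
    obtain ⟨r, hr⟩ := h
    rw [Classical.not_imp] at hr
    obtain ⟨hrR, hrl⟩ := hr
    rw [decide_eq_false hne]
    simp only [List.all_eq_false]
    exact ⟨r, hrR, by simpa using hrl⟩

-- ===== VERDICT (by name: the statement is the Claim_ definition above) =====
theorem is_happy_hopper_spec : Claim_equal_is_happy_hopper := by
  intro numbers _ _
  unfold Spec_is_happy_hopper is_happy_hopper is_happy_hopper_alt
  rw [differences_eq]
  apply all_contains_iff_sorted_eq
  rw [PySem.List.slice_from_one, PySem.List.length_pyRange_one, List.length_map,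
    List.length_zip, List.length_tail]
  omega
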